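-- pv_equiv track=rewrite | github.com/FryTheFrog/informatics_uzh | informatics_1/exercises/Ex_05_tuple_list_dict/4_juliets_number/public/script.py | get_possible_nrs
-- ===== SOURCE A (Python) =====
-- wa_nrs = ["0781111119", "0792653913", "0797763139", "0792793193", "0781139022", "0764320165"]
--
-- def get_possible_nrs(n):
--     possible_nrs = []
--     for pos in range(2, 10):
--         for i in range(10):
--             possible_nr = n[:pos] + str(i) + n[pos:]
--             possible_nrs.append(possible_nr)
--     possible_nrs_for_juliet = []
--     for nr in possible_nrs:
--         if nr in wa_nrs and nr not in possible_nrs_for_juliet: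
--             possible_nrs_for_juliet.append(nr)
--
--     return possible_nrs_for_juliet
-- ===== SOURCE B (Python) =====
-- wa_nrs = ["0781111119", "0792653913", "0797763139", "0792793193", "0781139022", "0764320165"]
--
-- def get_possible_nrs(n):
--     return [nr for nr in wa_nrs
--             if any(nr[:p] + nr[p + 1:] == n for p in range(2, 10))]
-- ===== Notes on version B (the rewrite author's own statement) =====
-- stated objective: simpler
-- what changed: Instead of generating all 80 digit-insertion candidates of n and filtering them against wa_nrs with an explicit dedup loop, B scans the fixed wa_nrs list once and keeps each number that reduces to n by deleting one digit at some position 2..9; this is safe because no two wa_nrs share a single-digit deletion, so the result never has more than one element and order/dedup never matter.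
import Mathlib
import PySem

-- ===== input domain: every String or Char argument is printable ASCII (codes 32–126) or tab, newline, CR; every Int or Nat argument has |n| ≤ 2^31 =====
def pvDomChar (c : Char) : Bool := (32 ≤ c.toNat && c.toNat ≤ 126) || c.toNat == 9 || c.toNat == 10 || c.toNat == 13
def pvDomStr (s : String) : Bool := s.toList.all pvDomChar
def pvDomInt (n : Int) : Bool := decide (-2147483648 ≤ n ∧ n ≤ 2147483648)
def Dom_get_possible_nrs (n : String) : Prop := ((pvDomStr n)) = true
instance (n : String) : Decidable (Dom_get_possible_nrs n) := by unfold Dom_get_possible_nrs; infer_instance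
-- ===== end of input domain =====

-- B avoids building the 80 insertion candidates: it scans the fixed wa_nrs list once and
-- tests whether each known number reduces to n by deleting one digit (simpler, same values).

-- module constant wa_nrs (shared by A and B, as in the Python module)
def wa_nrs : List String :=
  ["0781111119", "0792653913", "0797763139", "0792793193", "0781139022", "0764320165"]

-- ===== PORT A =====
def get_possible_nrs (n : String) : List String :=
  let possible_nrs : List String :=
    (PySem.List.pyRange 2 10 1).foldl (fun acc pos =>
      (PySem.List.pyRange 0 10 1).foldl (fun acc2 i =>
        acc2 ++ [PySem.Str.join "" [PySem.Str.slice n none (some pos),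
                                    PySem.Int.toStr i,
                                    PySem.Str.slice n (some pos) none]]) acc) []
  possible_nrs.foldl (fun acc nr =>
    if nr ∈ wa_nrs ∧ nr ∉ acc then acc ++ [nr] else acc) []

-- ===== PORT B =====
def get_possible_nrs_alt (n : String) : List String :=
  wa_nrs.filter (fun nr =>
    (PySem.List.pyRange 2 10 1).any (fun p =>
      PySem.Str.join "" [PySem.Str.slice nr none (some p),
                         PySem.Str.slice nr (some (p + 1)) none] == n))

-- ===== PRECONDITION & SPEC =====
def Spec_get_possible_nrs (n : String) (out : List String) : Prop := out = get_possible_nrs_alt n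
instance (n : String) (out : List String) : Decidable (Spec_get_possible_nrs n out) := by unfold Spec_get_possible_nrs; infer_instance

-- ===== CLAIM (what is proved, stated in full; the proofs are below) =====
def Claim_equal_get_possible_nrs : Prop := ∀ (n : String), Dom_get_possible_nrs n → Spec_get_possible_nrs n (get_possible_nrs n)

-- ===== LEMMAS AND PROOFS =====

-- A's insertion candidate and B's deletion string, as the ports build them
def candStr (n : String) (pos i : Int) : String :=
  PySem.Str.join "" [PySem.Str.slice n none (some pos), PySem.Int.toStr i,
                     PySem.Str.slice n (some pos) none]

def delJ (w : String) (p : Int) : String :=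
  PySem.Str.join "" [PySem.Str.slice w none (some p), PySem.Str.slice w (some (p + 1)) none]

-- two distinct wa_nrs never share a single-digit deletion (positions 2..9)
set_option maxHeartbeats 4000000 in
lemma uniq : ∀ w1 ∈ wa_nrs, ∀ w2 ∈ wa_nrs, ∀ p1 ∈ PySem.List.pyRange 2 10 1,
    ∀ p2 ∈ PySem.List.pyRange 2 10 1, delJ w1 p1 = delJ w2 p2 → w1 = w2 := by decide

-- every deletion of a wa_nr can be re-completed to it by one of A's candidates
set_option maxHeartbeats 4000000 in
lemma reinsert : ∀ w ∈ wa_nrs, ∀ p ∈ PySem.List.pyRange 2 10 1,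
    ∃ i ∈ PySem.List.pyRange 0 10 1, candStr (delJ w p) p i = w := by decide

lemma wa_len : ∀ w ∈ wa_nrs, w.toList.length = 10 := by decide

lemma wa_nodup : wa_nrs.Nodup := by decide

-- inserting a char into m at position pos ≤ 9 yields w (of length 10) only if
-- m is the deletion of w at pos
lemma ins_del (m w : List Char) (pos : Nat) (c : Char) (hw : w.length = 10)
    (hpos : pos ≤ 9) (h : m.take pos ++ c :: m.drop pos = w) :
    m = w.take pos ++ w.drop (pos + 1) := by
  have hlen : m.length = 9 := by
    have := congrArg List.length h
    simp at this
    omega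
  have hpl : pos ≤ m.length := by omega
  subst h
  rw [List.take_append, List.drop_append]
  have hL : (m.take pos).length = pos := by simp [Nat.min_eq_left hpl]
  rw [hL]
  simp [List.take_take, List.drop_of_length_le (by omega : (m.take pos).length ≤ pos + 1)]

lemma cand_toList (n : String) (pos i : Int) (h0 : 0 ≤ pos) :
    (candStr n pos i).toList =
      n.toList.take pos.toNat ++ (PySem.Int.toChars i ++ n.toList.drop pos.toNat) := by
  simp [candStr, PySem.Str.toList_join, PySem.Chars.join_cons_cons, PySem.Chars.join_singleton,
        PySem.Str.toList_slice, PySem.List.slice_to n.toList h0, PySem.List.slice_from n.toList h0,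
        PySem.Int.toList_toStr]

lemma delJ_toList (w : String) (p : Int) (h0 : 0 ≤ p) :
    (delJ w p).toList = w.toList.take p.toNat ++ w.toList.drop (p.toNat + 1) := by
  have h1 : (p + 1).toNat = p.toNat + 1 := by omega
  simp [delJ, PySem.Str.toList_join, PySem.Chars.join_cons_cons, PySem.Chars.join_singleton,
        PySem.Str.toList_slice, PySem.List.slice_to w.toList h0,
        PySem.List.slice_from w.toList (by omega : (0:Int) ≤ p + 1), h1]

lemma toChars_digit (i : Int) (h0 : 0 ≤ i) (h10 : i < 10) :
    ∃ c, PySem.Int.toChars i = [c] := by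
  interval_cases i
  · exact ⟨'0', by decide⟩
  · exact ⟨'1', by decide⟩
  · exact ⟨'2', by decide⟩
  · exact ⟨'3', by decide⟩
  · exact ⟨'4', by decide⟩
  · exact ⟨'5', by decide⟩
  · exact ⟨'6', by decide⟩
  · exact ⟨'7', by decide⟩
  · exact ⟨'8', by decide⟩
  · exact ⟨'9', by decide⟩

-- a candidate of A that hits a wa_nr identifies n as that wa_nr's deletion
lemma match_of_cand (n w : String) (pos i : Int) (hw : w ∈ wa_nrs)
    (hpos : pos ∈ PySem.List.pyRange 2 10 1) (hi : i ∈ PySem.List.pyRange 0 10 1)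
    (h : candStr n pos i = w) : delJ w pos = n := by
  rw [PySem.List.mem_pyRange_one] at hpos hi
  obtain ⟨c, hc⟩ := toChars_digit i hi.1 hi.2
  have hins : n.toList.take pos.toNat ++ c :: n.toList.drop pos.toNat = w.toList := by
    rw [← h, cand_toList n pos i (by omega), hc]
    simp
  have hdel := ins_del n.toList w.toList pos.toNat c (wa_len w hw) (by omega) hins
  have : (delJ w pos).toList = n.toList := by rw [delJ_toList w pos (by omega), ← hdel]
  calc delJ w pos = String.ofList (delJ w pos).toList := by rw [String.ofList_toList]
    _ = String.ofList n.toList := by rw [this]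
    _ = n := String.ofList_toList

-- B's per-entry test, named
def predB (n w : String) : Bool :=
  (PySem.List.pyRange 2 10 1).any (fun p => delJ w p == n)

lemma alt_eq_filter (n : String) : get_possible_nrs_alt n = wa_nrs.filter (predB n) := rfl

-- candidate hits a wa_nr → that wa_nr passes B's test
lemma predB_of_cand (n w : String) (pos i : Int) (hw : w ∈ wa_nrs)
    (hpos : pos ∈ PySem.List.pyRange 2 10 1) (hi : i ∈ PySem.List.pyRange 0 10 1)
    (h : candStr n pos i = w) : predB n w = true := by
  rw [predB, List.any_eq_true]
  exact ⟨pos, hpos, by rw [beq_iff_eq]; exact match_of_cand n w pos i hw hpos hi h⟩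

-- the A-side second loop returns acc unchanged when nothing is in wa_nrs
lemma foldl_guard_nil (xs : List String) (acc : List String)
    (h : ∀ x ∈ xs, x ∉ wa_nrs) :
    xs.foldl (fun acc nr => if nr ∈ wa_nrs ∧ nr ∉ acc then acc ++ [nr] else acc) acc = acc := by
  induction xs generalizing acc with
  | nil => rfl
  | cons x xs ih =>
    simp only [List.foldl_cons]
    rw [if_neg (by simp [h x (by simp)])]
    exact ih acc (fun y hy => h y (by simp [hy]))

-- once w is collected, nothing changes if every wa_nrs-hit equals w
lemma foldl_guard_keep (xs : List String) (w : String)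
    (h : ∀ x ∈ xs, x ∈ wa_nrs → x = w) :
    xs.foldl (fun acc nr => if nr ∈ wa_nrs ∧ nr ∉ acc then acc ++ [nr] else acc) [w] = [w] := by
  induction xs with
  | nil => rfl
  | cons x xs ih =>
    simp only [List.foldl_cons]
    have : ¬ (x ∈ wa_nrs ∧ x ∉ [w]) := by
      rintro ⟨h1, h2⟩
      exact h2 (by simp [h x (by simp) h1])
    rw [if_neg this]
    exact ih (fun y hy => h y (by simp [hy]))

-- the dedup-filter loop when every wa_nrs-hit equals the single w
lemma foldl_guard_single (xs : List String) (w : String) (hw : w ∈ wa_nrs)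
    (h : ∀ x ∈ xs, x ∈ wa_nrs → x = w) :
    xs.foldl (fun acc nr => if nr ∈ wa_nrs ∧ nr ∉ acc then acc ++ [nr] else acc) [] =
      if w ∈ xs then [w] else [] := by
  induction xs with
  | nil => rfl
  | cons x xs ih =>
    simp only [List.foldl_cons]
    by_cases hx : x ∈ wa_nrs
    · have hxw : x = w := h x (by simp) hx
      subst hxw
      rw [if_pos (by simp [hx]), if_pos (by simp)]
      simp only [List.nil_append]
      exact foldl_guard_keep xs x (fun y hy => h y (by simp [hy]))
    · rw [if_neg (by simp [hx])]
      rw [ih (fun y hy => h y (by simp [hy]))]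
      have hxne : x ≠ w := fun he => hx (he ▸ hw)
      by_cases hmem : w ∈ xs
      · rw [if_pos hmem, if_pos (by simp [hmem])]
      · have hwx : w ∉ x :: xs := by
          simp only [List.mem_cons, not_or]
          exact ⟨fun he => hxne he.symm, hmem⟩
        rw [if_neg hmem, if_neg hwx]

-- A's candidate list in flatMap form, and A as the guard loop over it
lemma a_eq (n : String) :
    get_possible_nrs n =
      ((PySem.List.pyRange 2 10 1).flatMap (fun pos =>
        (PySem.List.pyRange 0 10 1).map (fun i => candStr n pos i))).foldl
        (fun acc nr => if nr ∈ wa_nrs ∧ nr ∉ acc then acc ++ [nr] else acc) [] := by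
  unfold get_possible_nrs
  simp only [PySem.List.foldl_append_singleton_eq_map, PySem.List.foldl_append_eq_flatMap,
             List.nil_append]
  rfl

-- filtering a Nodup list whose predicate holds exactly at w gives [w]
lemma filter_unique (xs : List String) (w : String) (p : String → Bool) (hnd : xs.Nodup)
    (hw : w ∈ xs) (hpw : p w = true) (h : ∀ x ∈ xs, p x = true → x = w) :
    xs.filter p = [w] := by
  induction xs with
  | nil => cases hw
  | cons x xs ih =>
    rcases List.mem_cons.mp hw with rfl | hw'
    · rw [List.filter_cons_of_pos hpw]
      have : xs.filter p = [] := by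
        rw [List.filter_eq_nil_iff]
        intro a ha hpa
        have := h a (by simp [ha]) hpa
        subst this
        exact (List.nodup_cons.mp hnd).1 ha
      rw [this]
    · have hxw : x ≠ w := fun he => (List.nodup_cons.mp hnd).1 (he ▸ hw')
      rw [List.filter_cons_of_neg (fun hpx => hxw (h x (by simp) hpx))]
      exact ih (List.nodup_cons.mp hnd).2 hw' (fun y hy => h y (by simp [hy]))

-- ===== VERDICT (by name: the statement is the Claim_ definition above) =====
theorem get_possible_nrs_spec : Claim_equal_get_possible_nrs := by
  intro n _
  unfold Spec_get_possible_nrs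
  rw [a_eq, alt_eq_filter]
  by_cases hB : ∃ w ∈ wa_nrs, predB n w = true
  · obtain ⟨w, hw, hpw⟩ := hB
    obtain ⟨p, hp, heq⟩ := List.any_eq_true.mp hpw
    rw [beq_iff_eq] at heq
    -- every wa_nrs entry passing B's test equals w
    have huniq : ∀ w' ∈ wa_nrs, predB n w' = true → w' = w := by
      intro w' hw' hpw'
      obtain ⟨p', hp', heq'⟩ := List.any_eq_true.mp hpw'
      rw [beq_iff_eq] at heq'
      exact uniq w' hw' w hw p' hp' p hp (by rw [heq', heq])
    -- every candidate hitting wa_nrs equals w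
    have hcand : ∀ x ∈ (PySem.List.pyRange 2 10 1).flatMap (fun pos =>
        (PySem.List.pyRange 0 10 1).map (fun i => candStr n pos i)), x ∈ wa_nrs → x = w := by
      intro x hx hxw
      simp only [List.mem_flatMap, List.mem_map] at hx
      obtain ⟨pos, hpos, i, hi, rfl⟩ := hx
      exact huniq _ hxw (predB_of_cand n _ pos i hxw hpos hi rfl)
    rw [foldl_guard_single _ w hw hcand, filter_unique wa_nrs w (predB n) wa_nodup hw hpw huniq]
    -- w is among the candidates: reinsert its deleted digit
    obtain ⟨i, hi, hci⟩ := reinsert w hw p hp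
    rw [if_pos]
    simp only [List.mem_flatMap, List.mem_map]
    exact ⟨p, hp, i, hi, by rw [← heq]; exact hci⟩
  · simp only [not_exists, not_and] at hB
    rw [foldl_guard_nil, List.filter_eq_nil_iff.mpr (fun w hw => by simp [hB w hw])]
    intro x hx hxw
    simp only [List.mem_flatMap, List.mem_map] at hx
    obtain ⟨pos, hpos, i, hi, rfl⟩ := hx
    exact (hB _ hxw) (predB_of_cand n _ pos i hxw hpos hi rfl)
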